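-- pv_equiv track=rewrite | github.com/Kyuber1007/problemsolving | programmers/모의고사.py | solution
-- ===== SOURCE A (Python) =====
-- def solution(answers):
--     answer = []
--     supo1 = [1, 2, 3, 4, 5]
--     supo2 = [2, 1, 2, 3, 2, 4, 2, 5]
--     supo3 = [3, 3, 1, 1, 2, 2, 4, 4, 5, 5]
--
--     score = [0, 0, 0]
--
--     for i in range(len(answers)):
--         if supo1[i%5] == answers[i]:
--             score[0] += 1
--         if supo2[i%8] == answers[i]:
--             score[1] += 1
--         if supo3[i%10] == answers[i]:
--             score[2] += 1
--     max_score = max(score)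
--     for i in range(3):
--         if score[i] == max_score:
--             answer.append(i + 1)
--     return answer
-- ===== SOURCE B (Python) =====
-- def solution(answers):
--     # One pass: histogram of (position mod 40, given answer); 40 = lcm(5, 8, 10),
--     # so every pattern's value at position i depends only on i % 40.
--     counts = {}
--     for i, a in enumerate(answers):
--         key = (i % 40, a)
--         counts[key] = counts.get(key, 0) + 1
--     patterns = [[1, 2, 3, 4, 5],
--                 [2, 1, 2, 3, 2, 4, 2, 5],
--                 [3, 3, 1, 1, 2, 2, 4, 4, 5, 5]]
--     # Each score is 40 histogram lookups; no scan of `answers` per pattern.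
--     scores = [sum(counts.get((r, p[r % len(p)]), 0) for r in range(40))
--               for p in patterns]
--     best = max(scores)
--     return [k + 1 for k in range(3) if scores[k] == best]
-- ===== Notes on version B (the rewrite author's own statement) =====
-- stated objective: alternative
-- what changed: B builds a histogram dict keyed by (index mod 40, answer) in one pattern-free pass, then computes each pattern's score by 40 dictionary lookups (40 = lcm of the periods) instead of matching patterns position-by-position against the answers.
import Mathlib
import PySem

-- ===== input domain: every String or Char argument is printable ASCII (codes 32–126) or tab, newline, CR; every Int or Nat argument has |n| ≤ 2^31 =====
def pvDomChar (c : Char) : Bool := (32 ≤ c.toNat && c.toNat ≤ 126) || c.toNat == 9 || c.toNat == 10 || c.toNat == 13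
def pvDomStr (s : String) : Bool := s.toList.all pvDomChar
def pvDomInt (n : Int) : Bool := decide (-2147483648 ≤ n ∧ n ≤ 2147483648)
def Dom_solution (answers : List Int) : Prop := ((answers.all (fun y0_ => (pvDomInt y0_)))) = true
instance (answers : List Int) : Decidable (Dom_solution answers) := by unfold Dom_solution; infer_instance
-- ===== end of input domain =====

-- B replaces A's position-by-position pattern matching by a histogram of
-- (index mod 40, answer) built in one pattern-free pass; each pattern's score
-- is then 40 histogram lookups (alternative algorithm, same asymptotic cost).

-- ===== PORT A =====
def supo1 : List Int := [1, 2, 3, 4, 5]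
def supo2 : List Int := [2, 1, 2, 3, 2, 4, 2, 5]
def supo3 : List Int := [3, 3, 1, 1, 2, 2, 4, 4, 5, 5]

-- the 'for i in range(len(answers))' loop: walk the answers with the running index i
def aLoop : List Int → Int → Int × Int × Int → Int × Int × Int
  | [], _, s => s
  | a :: rest, i, (s0, s1, s2) =>
      aLoop rest (i + 1)
        ((if PySem.List.pyGetD supo1 (PySem.Int.mod i 5) 0 = a then s0 + 1 else s0),
         (if PySem.List.pyGetD supo2 (PySem.Int.mod i 8) 0 = a then s1 + 1 else s1),
         (if PySem.List.pyGetD supo3 (PySem.Int.mod i 10) 0 = a then s2 + 1 else s2))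

def solution (answers : List Int) : List Int :=
  let score := aLoop answers 0 (0, 0, 0)
  let maxScore := max score.1 (max score.2.1 score.2.2)
  -- for i in range(3): if score[i] == max_score: answer.append(i+1)
  ((if score.1 = maxScore then [(1 : Int)] else []) ++
   (if score.2.1 = maxScore then [2] else []) ++
   (if score.2.2 = maxScore then [3] else []))

-- ===== PORT B =====
-- counts = {}; for i, a in enumerate(answers): counts[(i%40, a)] = counts.get(..., 0) + 1
def bCounts (answers : List Int) : PySem.Dict (Int × Int) Int :=
  (PySem.List.enumerate answers 0).foldl
    (fun d ia =>
      d.insert (PySem.Int.mod ia.1 40, ia.2) (d.getD (PySem.Int.mod ia.1 40, ia.2) 0 + 1))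
    PySem.Dict.empty

def bPatterns : List (List Int) := [[1, 2, 3, 4, 5], [2, 1, 2, 3, 2, 4, 2, 5], [3, 3, 1, 1, 2, 2, 4, 4, 5, 5]]

-- sum(counts.get((r, p[r % len(p)]), 0) for r in range(40))
def bScore (counts : PySem.Dict (Int × Int) Int) (p : List Int) : Int :=
  (PySem.List.pyRange 0 40 1).foldl
    (fun acc r =>
      acc + counts.getD (r, PySem.List.pyGetD p (PySem.Int.mod r (p.length : Int)) 0) 0) 0

def solution_alt (answers : List Int) : List Int :=
  let counts := bCounts answers
  let scores := bPatterns.map (bScore counts)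
  let best := (PySem.List.max? scores (fun y => y)).getD 0
  (PySem.List.pyRange 0 3 1).foldl
    (fun acc k => if PySem.List.pyGetD scores k 0 = best then acc ++ [k + 1] else acc) []

-- ===== PRECONDITION & SPEC =====
def Spec_solution (answers : List Int) (out : List Int) : Prop := out = solution_alt answers
instance (answers : List Int) (out : List Int) : Decidable (Spec_solution answers out) := by unfold Spec_solution; infer_instance

-- ===== CLAIM =====
def Claim_equal_solution : Prop := ∀ (answers : List Int), Dom_solution answers → Spec_solution answers (solution answers)

-- ===== LEMMAS AND PROOFS =====

-- reference count of matches of pattern p against answers, starting at index i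
def cnt (p : List Int) : List Int → Int → Int
  | [], _ => 0
  | a :: r, i => (if PySem.List.pyGetD p (PySem.Int.mod i (p.length : Int)) 0 = a then 1 else 0) + cnt p r (i + 1)

-- the (i % 40, a) keys B's histogram is built from, for indices starting at i
def keysFrom (answers : List Int) (i : Int) : List (Int × Int) :=
  (PySem.List.enumerate answers i).map (fun ia => (PySem.Int.mod ia.1 40, ia.2))

-- B's per-pattern sum, abstracted over the key list
def pget (p : List Int) (r : Int) : Int := PySem.List.pyGetD p (PySem.Int.mod r (p.length : Int)) 0

def S (p : List Int) (ks : List (Int × Int)) : Int :=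
  (PySem.List.pyRange 0 40 1).foldl (fun acc r => acc + (ks.count (r, pget p r) : Int)) 0

lemma aLoop_eq_cnt (answers : List Int) : ∀ (i s0 s1 s2 : Int),
    aLoop answers i (s0, s1, s2) =
      (s0 + cnt supo1 answers i, s1 + cnt supo2 answers i, s2 + cnt supo3 answers i) := by
  induction answers with
  | nil => intro i s0 s1 s2; simp [aLoop, cnt]
  | cons a r ih =>
      intro i s0 s1 s2
      simp only [aLoop, cnt, ih]
      have h1 : ((supo1.length : Int)) = 5 := by decide
      have h2 : ((supo2.length : Int)) = 8 := by decide
      have h3 : ((supo3.length : Int)) = 10 := by decide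
      rw [h1, h2, h3]
      split_ifs <;> simp only [Prod.mk.injEq] <;> refine ⟨by ring, by ring, by ring⟩

lemma sum_ite_zero (g : Int → Int) (j a : Int) :
    ∀ L : List Int, j ∉ L →
      (L.map (fun r => if ((j, a) : Int × Int) = (r, g r) then (1 : Int) else 0)).sum = 0 := by
  intro L
  induction L with
  | nil => intro _; simp
  | cons r L ih =>
      intro h
      have hr : j ≠ r := fun hj => h (hj ▸ List.mem_cons_self ..)
      simp only [List.map_cons, List.sum_cons, ih (fun hm => h (List.mem_cons_of_mem _ hm))]
      have : ((j, a) : Int × Int) ≠ (r, g r) := by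
        intro he; exact hr (congrArg Prod.fst he)
      simp [this]

lemma sum_ite_unique (g : Int → Int) (j a : Int) :
    ∀ L : List Int, L.Nodup → j ∈ L →
      (L.map (fun r => if ((j, a) : Int × Int) = (r, g r) then (1 : Int) else 0)).sum
        = if g j = a then 1 else 0 := by
  intro L
  induction L with
  | nil => intro _ h; cases h
  | cons r L ih =>
      intro hnd hmem
      rcases List.nodup_cons.mp hnd with ⟨hnotin, hnd'⟩
      by_cases hj : j = r
      · subst hj
        simp only [List.map_cons, List.sum_cons, sum_ite_zero g j a L hnotin]
        by_cases hg : g j = a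
        · simp [hg]
        · have : ((j, a) : Int × Int) ≠ (j, g j) := by
            intro he; exact hg (congrArg Prod.snd he).symm
          simp [this, hg]
      · have hmem' : j ∈ L := by
          rcases List.mem_cons.mp hmem with h | h
          · exact absurd h hj
          · exact h
        have : ((j, a) : Int × Int) ≠ (r, g r) := by
          intro he; exact hj (congrArg Prod.fst he)
        simp only [List.map_cons, List.sum_cons, ih hnd' hmem', this, if_false, zero_add]

lemma S_cons (p : List Int) (j a : Int) (ks : List (Int × Int))
    (h0 : 0 ≤ j) (h40 : j < 40) :
    S p ((j, a) :: ks) = (if pget p j = a then 1 else 0) + S p ks := by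
  simp only [S, PySem.List.foldl_add, zero_add]
  have hc : ∀ r ∈ PySem.List.pyRange 0 40 1,
      (fun r => ((((j, a) :: ks).count (r, pget p r) : Nat) : Int)) r
        = (fun r => ((ks.count (r, pget p r) : Nat) : Int)
            + (if ((j, a) : Int × Int) = (r, pget p r) then 1 else 0)) r := by
    intro r _
    by_cases h : ((j, a) : Int × Int) = (r, pget p r) <;> simp [h]
  rw [List.map_congr_left hc, PySem.List.sum_map_add_int,
      sum_ite_unique (pget p) j a _ (by decide) (PySem.List.mem_pyRange_one.mpr ⟨h0, h40⟩)]
  ring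

lemma counts_getD (answers : List Int) (v : Int × Int) :
    (bCounts answers).getD v 0 = ((keysFrom answers 0).count v : Int) := by
  unfold bCounts keysFrom
  have hfm := List.foldl_map (f := fun ia : Int × Int => (PySem.Int.mod ia.1 40, ia.2))
    (g := fun (d : PySem.Dict (Int × Int) Int) (x : Int × Int) => d.insert x (d.getD x 0 + 1))
    (l := PySem.List.enumerate answers 0) (init := PySem.Dict.empty)
  rw [← hfm, PySem.Dict.getD_foldl_insert_add_one]
  simp

lemma S_keys (p : List Int) (hL : 0 < (p.length : Int)) (hdvd : (p.length : Int) ∣ 40) :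
    ∀ (answers : List Int) (i : Int),
      S p (keysFrom answers i) = cnt p answers i := by
  intro answers
  induction answers with
  | nil =>
      intro i
      simp [keysFrom, PySem.List.enumerate_nil, S, cnt]
  | cons a r ih =>
      intro i
      rw [keysFrom, PySem.List.enumerate_cons, List.map_cons]
      have hmm : PySem.Int.mod (PySem.Int.mod i 40) (p.length : Int)
          = PySem.Int.mod i (p.length : Int) := by
        rw [PySem.Int.mod_eq_emod_of_pos hL,
            PySem.Int.mod_eq_emod_of_pos (by norm_num : (0 : Int) < 40),
            PySem.Int.mod_eq_emod_of_pos hL,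
            Int.emod_emod_of_dvd _ hdvd]
      have := S_cons p (PySem.Int.mod i 40) a (keysFrom r (i + 1))
        (PySem.Int.mod_nonneg i (by norm_num)) (PySem.Int.mod_lt i (by norm_num))
      rw [show ((PySem.Int.mod i 40, a) :: (PySem.List.enumerate r (i + 1)).map
            (fun ia => (PySem.Int.mod ia.1 40, ia.2)))
          = (PySem.Int.mod i 40, a) :: keysFrom r (i + 1) from rfl, this, ih]
      simp only [cnt, pget, hmm]

-- ===== VERDICT =====
theorem solution_spec : Claim_equal_solution := by
  intro answers _
  show solution answers = solution_alt answers
  have hb : ∀ p : List Int, 0 < (p.length : Int) → (p.length : Int) ∣ 40 →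
      bScore (bCounts answers) p = cnt p answers 0 := by
    intro p h1 h2
    have hS : bScore (bCounts answers) p = S p (keysFrom answers 0) := by
      unfold bScore S pget
      simp only [counts_getD]
    rw [hS, S_keys p h1 h2]
  have h1 := hb [1, 2, 3, 4, 5] (by decide) (by decide)
  have h2 := hb [2, 1, 2, 3, 2, 4, 2, 5] (by decide) (by decide)
  have h3 := hb [3, 3, 1, 1, 2, 2, 4, 4, 5, 5] (by decide) (by decide)
  simp only [solution, solution_alt, bPatterns, List.map, h1, h2, h3,
    aLoop_eq_cnt, supo1, supo2, supo3, PySem.List.max?_id_cons, Option.getD_some, zero_add]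
  generalize cnt [1, 2, 3, 4, 5] answers 0 = c1
  generalize cnt [2, 1, 2, 3, 2, 4, 2, 5] answers 0 = c2
  generalize cnt [3, 3, 1, 1, 2, 2, 4, 4, 5, 5] answers 0 = c3
  rw [show PySem.List.pyRange 0 3 1 = [0, 1, 2] from by decide]
  simp only [List.foldl, max_assoc,
    show ∀ x y z : Int, PySem.List.pyGetD [x, y, z] 0 0 = x from fun _ _ _ => rfl,
    show ∀ x y z : Int, PySem.List.pyGetD [x, y, z] 1 0 = y from fun _ _ _ => rfl,
    show ∀ x y z : Int, PySem.List.pyGetD [x, y, z] 2 0 = z from fun _ _ _ => rfl]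
  split_ifs <;> norm_num
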